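-- pv_equiv track=rewrite | github.com/michalwoelke/korki | maturki/2022/zad4.py | zad2
-- ===== SOURCE A (Python) =====
-- def zad2(arr:list):
-- 	arr = [int(x) for x in arr]
-- 	all_czynniki = []
-- 	most_czynniki = 0
-- 	number_of_1 = 0
-- 	most_unique_czynniki = 0
-- 	number_of_2 = 0
-- 	for el in arr:
-- 		czynniki = []
-- 		k = 2
-- 		tmp = el
-- 		while el != 1:
-- 			while el % k == 0:
-- 				el //= k
-- 				czynniki.append(k)
-- 			k += 1
-- 		if len(czynniki) > number_of_1:
-- 			most_czynniki = tmp
-- 			number_of_1 = len(czynniki)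
-- 		if len(set(czynniki)) > number_of_2:
-- 			most_unique_czynniki = tmp
-- 			number_of_2 = len(set(czynniki))
-- 	return (most_czynniki, number_of_1), (most_unique_czynniki, number_of_2)
-- ===== SOURCE B (Python) =====
-- def zad2(arr: list):
--     # Trial division only up to sqrt(el), counting totals directly (no factor list / set built).
--     best_t = (0, 0)
--     best_d = (0, 0)
--     for x in arr:
--         x = int(x)
--         n = x
--         total = 0
--         distinct = 0
--         d = 2
--         while d * d <= n:
--             if n % d == 0:
--                 distinct += 1
--                 while n % d == 0:
--                     n //= d
--                     total += 1
--             d += 1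
--         if n > 1:
--             total += 1
--             distinct += 1
--         if total > best_t[1]:
--             best_t = (x, total)
--         if distinct > best_d[1]:
--             best_d = (x, distinct)
--     return best_t, best_d
-- ===== Notes on version B (the rewrite author's own statement) =====
-- stated objective: faster
-- what changed: B replaces A's full trial division up to el (building a factor list and a set per element) by trial division only up to sqrt(el) with a residual-prime step, keeping integer counters instead of lists/sets; intended as asymptotically faster (a timing run could not measure a ratio: A timed out at sizes where B returned).
import Mathlib
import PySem

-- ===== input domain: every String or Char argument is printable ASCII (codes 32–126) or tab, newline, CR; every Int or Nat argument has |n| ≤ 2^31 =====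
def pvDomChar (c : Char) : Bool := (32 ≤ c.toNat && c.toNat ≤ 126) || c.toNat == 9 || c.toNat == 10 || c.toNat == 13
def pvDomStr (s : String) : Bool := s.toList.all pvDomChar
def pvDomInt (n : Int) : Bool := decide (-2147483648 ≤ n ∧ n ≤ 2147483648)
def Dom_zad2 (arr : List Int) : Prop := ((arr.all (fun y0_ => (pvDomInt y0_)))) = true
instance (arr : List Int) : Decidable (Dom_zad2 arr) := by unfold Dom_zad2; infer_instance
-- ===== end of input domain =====

-- B replaces A's trial division up to el by trial division up to sqrt(el) with a residual-prime
-- step, keeping integer counters instead of a factor list and a set; intended as asymptotically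
-- faster (measured: a timing run's A timed out at sizes where B returned, so no ratio).

-- ===== PORT A =====
-- inner 'while el % k == 0: el //= k; czynniki.append(k)'; fueled (fuel = el.toNat suffices for el ≥ 1)
def pvInnerA (el k : Int) (fuel : Nat) : Int × List Int :=
  match fuel with
  | 0 => (el, [])
  | f + 1 =>
    if PySem.Int.mod el k = 0 then
      let r := pvInnerA (PySem.Int.floordiv el k) k f
      (r.1, k :: r.2)
    else (el, [])

-- outer 'while el != 1: … ; k += 1'; fueled (fuel = el.toNat + 1 suffices for el ≥ 1)
def pvOuterA (el k : Int) (fuel : Nat) : List Int :=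
  match fuel with
  | 0 => []
  | f + 1 =>
    if el = 1 then []
    else
      let r := pvInnerA el k el.toNat
      r.2 ++ pvOuterA r.1 (k + 1) f

-- 'arr = [int(x) for x in arr]' is the identity on a list of ints and is not repeated here.
def zad2 (arr : List Int) : (Int × Int) × (Int × Int) :=
  arr.foldl
    (fun (st : (Int × Int) × (Int × Int)) el =>
      let czynniki := pvOuterA el 2 (el.toNat + 1)
      let st1 := if (czynniki.length : Int) > st.1.2 then (el, (czynniki.length : Int)) else st.1
      let st2 := if ((PySem.Set.ofList czynniki).length : Int) > st.2.2 then
                   (el, ((PySem.Set.ofList czynniki).length : Int)) else st.2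
      (st1, st2))
    ((0, 0), (0, 0))

-- ===== PORT B =====
-- inner 'while n % d == 0: n //= d; total += 1'
def pvInnerB (n d total : Int) (fuel : Nat) : Int × Int :=
  match fuel with
  | 0 => (n, total)
  | f + 1 =>
    if PySem.Int.mod n d = 0 then pvInnerB (PySem.Int.floordiv n d) d (total + 1) f
    else (n, total)

-- 'while d * d <= n: …; d += 1'; fueled (fuel = n.toNat + 1 suffices)
def pvLoopB (n d total distinct : Int) (fuel : Nat) : Int × Int × Int :=
  match fuel with
  | 0 => (n, total, distinct)
  | f + 1 =>
    if d * d ≤ n then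
      if PySem.Int.mod n d = 0 then
        let r := pvInnerB n d total n.toNat
        pvLoopB r.1 (d + 1) r.2 (distinct + 1) f
      else pvLoopB n (d + 1) total distinct f
    else (n, total, distinct)

def pvCountsB (x : Int) : Int × Int :=
  let r := pvLoopB x 2 0 0 (x.toNat + 1)
  if r.1 > 1 then (r.2.1 + 1, r.2.2 + 1) else r.2

def zad2_alt (arr : List Int) : (Int × Int) × (Int × Int) :=
  arr.foldl
    (fun (st : (Int × Int) × (Int × Int)) x =>
      let c := pvCountsB x
      ((if c.1 > st.1.2 then (x, c.1) else st.1),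
       (if c.2 > st.2.2 then (x, c.2) else st.2)))
    ((0, 0), (0, 0))

-- ===== PRECONDITION & SPEC =====
-- Pre_ excludes only inputs containing an element ≤ 0, on which Python A never returns
-- (its 'while el != 1' loop runs forever), so Pre_ is exactly A's domain of termination.
def Pre_zad2 (arr : List Int) : Prop := ∀ x ∈ arr, 1 ≤ x
instance (arr : List Int) : Decidable (Pre_zad2 arr) := by unfold Pre_zad2; infer_instance
def pvWitness_zad2 : List Int := [12, 7, 1, 30]

def Spec_zad2 (arr : List Int) (out : (Int × Int) × (Int × Int)) : Prop := out = zad2_alt arr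
instance (arr : List Int) (out : (Int × Int) × (Int × Int)) : Decidable (Spec_zad2 arr out) := by unfold Spec_zad2; infer_instance

-- ===== CLAIM (what is proved, stated in full; the proofs are below) =====
def Claim_equal_zad2 : Prop := ∀ (arr : List Int), Dom_zad2 arr → Pre_zad2 arr → Spec_zad2 arr (zad2 arr)

-- ===== LEMMAS AND PROOFS =====

-- B's inner loop is A's inner loop, with the count in place of the list.
theorem pvInnerB_eq_A (fuel : Nat) : ∀ (n d t : Int),
    pvInnerB n d t fuel = ((pvInnerA n d fuel).1, t + ((pvInnerA n d fuel).2.length : Int)) := by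
  induction fuel with
  | zero => intro n d t; simp [pvInnerA, pvInnerB]
  | succ f ih =>
    intro n d t
    simp only [pvInnerA, pvInnerB]
    by_cases h : PySem.Int.mod n d = 0
    · simp [h, ih]; ring
    · simp [h]

-- characterisation of A's inner loop on positive input with sufficient fuel
theorem pvInnerA_spec (fuel : Nat) : ∀ (el k : Int), 1 ≤ el → 2 ≤ k → el.toNat ≤ fuel →
    ∃ (v : Nat) (e : Int), pvInnerA el k fuel = (e, List.replicate v k) ∧
      1 ≤ e ∧ el = e * k ^ v ∧ ¬ (k ∣ e) := by
  induction fuel with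
  | zero => intro el k h1 h2 hf; omega
  | succ f ih =>
    intro el k h1 h2 hf
    by_cases hm : PySem.Int.mod el k = 0
    · have hdvd : k ∣ el := (PySem.Int.mod_eq_zero_iff_dvd el k).mp hm
      obtain ⟨m, hmm⟩ := hdvd
      have hm1 : 1 ≤ m := by nlinarith
      have h2m : m * 2 ≤ el := by nlinarith
      have hfd : PySem.Int.floordiv el k = m := by
        rw [PySem.Int.floordiv_eq_ediv_of_pos (by omega : (0:Int) < k), hmm]
        exact Int.mul_ediv_cancel_left m (by omega)
      obtain ⟨v, e, heq, he, hmul, hnd⟩ := ih m k hm1 h2 (by omega)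
      refine ⟨v + 1, e, ?_, he, ?_, hnd⟩
      · simp only [pvInnerA, if_pos hm, hfd, heq, List.replicate_succ]
      · rw [hmm, hmul]; ring
    · refine ⟨0, el, by simp [pvInnerA, hm], h1, by simp, fun hd => hm ?_⟩
      exact (PySem.Int.mod_eq_zero_iff_dvd el k).mpr hd

theorem pvInnerA_mem (fuel : Nat) : ∀ (el k x : Int), x ∈ (pvInnerA el k fuel).2 → x = k := by
  induction fuel with
  | zero => intro el k x h; simp [pvInnerA] at h
  | succ f ih =>
    intro el k x h
    simp only [pvInnerA] at h
    by_cases hm : PySem.Int.mod el k = 0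
    · simp [hm] at h
      rcases h with h | h
      · exact h
      · exact ih _ _ _ h
    · simp [hm] at h

theorem pvOuterA_mem (fuel : Nat) : ∀ (el k x : Int), x ∈ pvOuterA el k fuel → k ≤ x := by
  induction fuel with
  | zero => intro el k x h; simp [pvOuterA] at h
  | succ f ih =>
    intro el k x h
    simp only [pvOuterA] at h
    by_cases h1 : el = 1
    · simp [h1] at h
    · simp [h1] at h
      rcases h with h | h
      · exact le_of_eq (pvInnerA_mem _ _ _ _ h).symm
      · have := ih _ _ _ h; omega

-- the set-size of a list is the card of its Finset of elements
theorem setLen_eq_card (l : List Int) : ((PySem.Set.ofList l).length : Int) = (l.toFinset.card : Int) := by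
  have hn : (PySem.Set.ofList l).Nodup := PySem.Set.nodup_ofList l
  have hf : (PySem.Set.ofList l).toFinset = l.toFinset := by
    ext x; simp [List.mem_toFinset, PySem.Set.mem_ofList]
  have hc := List.toFinset_card_of_nodup hn
  rw [hf] at hc
  exact_mod_cast hc.symm

theorem pvOuterA_one (fuel : Nat) (k : Int) : pvOuterA 1 k fuel = [] := by
  cases fuel <;> simp [pvOuterA]

theorem pvInnerA_ndvd (fuel : Nat) (el k : Int) (hf : 1 ≤ fuel)
    (hm : PySem.Int.mod el k ≠ 0) : pvInnerA el k fuel = (el, []) := by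
  obtain ⟨f, rfl⟩ : ∃ f, fuel = f + 1 := ⟨fuel - 1, by omega⟩
  simp [pvInnerA, hm]

-- A's outer loop on a prime residue: the remaining iterations produce exactly [el].
theorem pvOuterA_prime (fuel : Nat) : ∀ (el k : Int), 2 ≤ k → k ≤ el →
    (∀ j : Int, 2 ≤ j → j < k → ¬ (j ∣ el)) → el < k * k →
    el.toNat + 1 ≤ fuel + k.toNat → pvOuterA el k fuel = [el] := by
  induction fuel with
  | zero => intro el k hk hkel hnd hlt hf; omega
  | succ f ih =>
    intro el k hk hkel hnd hlt hf
    have hel1 : el ≠ 1 := by omega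
    simp only [pvOuterA, if_neg hel1]
    by_cases hke : k = el
    · subst hke
      obtain ⟨v, e, heq, he, hmul, hnde⟩ := pvInnerA_spec k.toNat k k (by omega) hk le_rfl
      have hv1 : v = 1 := by
        rcases v with _ | _ | v
        · exfalso; apply hnde; simp at hmul; rw [← hmul]
        · rfl
        · exfalso
          have h1 : k ^ 2 ≤ k ^ (v + 1 + 1) := pow_le_pow_right₀ (by omega) (by omega)
          have h2 : e * k ^ (v + 1 + 1) ≥ 1 * k ^ (v + 1 + 1) := by
            apply mul_le_mul_of_nonneg_right he (by positivity)
          nlinarith [hmul, h1, h2]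
      subst hv1
      have he1 : e = 1 := by
        have : e * k ^ 1 = k := hmul.symm
        simp at this; nlinarith
      rw [heq, he1]
      simp [pvOuterA_one]
    · have hlt2 : k < el := lt_of_le_of_ne hkel hke
      have hnk : ¬ (k ∣ el) := by
        rintro ⟨m, hmm⟩
        have hm1 : 1 ≤ m := by nlinarith
        have hm2 : m ≠ 1 := by intro h; rw [h] at hmm; omega
        have hmk : m < k := by nlinarith
        exact hnd m (by omega) hmk ⟨k, by rw [hmm]; ring⟩
      have hm0 : PySem.Int.mod el k ≠ 0 := fun h => hnk ((PySem.Int.mod_eq_zero_iff_dvd el k).mp h)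
      rw [pvInnerA_ndvd el.toNat el k (by omega) hm0]
      have hnd' : ∀ j : Int, 2 ≤ j → j < k + 1 → ¬ (j ∣ el) := by
        intro j hj2 hjk
        by_cases hjek : j = k
        · rw [hjek]; exact hnk
        · exact hnd j hj2 (by omega)
      have := ih el (k + 1) (by omega) (by omega) hnd' (by nlinarith) (by omega)
      simpa using this

-- main joint-induction lemma relating B's sqrt loop to A's full loop
theorem pvMain (fB : Nat) : ∀ (fA : Nat) (el k t s : Int), 1 ≤ el → 2 ≤ k →
    (∀ j : Int, 2 ≤ j → j < k → ¬ (j ∣ el)) →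
    el.toNat + 2 ≤ fB + k.toNat → el.toNat + 2 ≤ fA + k.toNat →
    (let L := pvOuterA el k fA
     let r := pvLoopB el k t s fB
     (if r.1 > 1 then r.2.1 + 1 else r.2.1) = t + (L.length : Int) ∧
     (if r.1 > 1 then r.2.2 + 1 else r.2.2) = s + ((PySem.Set.ofList L).length : Int)) := by
  induction fB with
  | zero =>
    intro fA el k t s h1 h2 hnd hfB hfA
    have he1 : el = 1 := by
      by_contra h
      exact hnd el (by omega) (by omega) dvd_rfl
    subst he1
    simp [pvLoopB, pvOuterA_one]
  | succ f ih =>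
    intro fA el k t s h1 h2 hnd hfB hfA
    simp only [pvLoopB]
    by_cases hdd : k * k ≤ el
    · have hel4 : 4 ≤ el := by nlinarith
      have hkel : k ≤ el := by nlinarith
      have hkle : k.toNat ≤ el.toNat := by omega
      obtain ⟨fA', rfl⟩ : ∃ fA', fA = fA' + 1 := ⟨fA - 1, by omega⟩
      simp only [pvOuterA, if_neg (by omega : el ≠ 1), if_pos hdd]
      by_cases hm : PySem.Int.mod el k = 0
      · obtain ⟨v, e, heq, he1, hmul, hnde⟩ := pvInnerA_spec el.toNat el k h1 h2 le_rfl
        have hkd : k ∣ el := (PySem.Int.mod_eq_zero_iff_dvd el k).mp hm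
        have hv1 : 1 ≤ v := by
          rcases Nat.eq_zero_or_pos v with h0 | h0
          · exfalso; apply hnde; subst h0
            have hee : el = e := by simpa using hmul
            exact hee ▸ hkd
          · exact h0
        have hkv : k ^ 1 ≤ k ^ v := pow_le_pow_right₀ (by omega) hv1
        have he2 : e * 2 ≤ el := by
          have : e * (k ^ 1) ≤ e * k ^ v := mul_le_mul_of_nonneg_left hkv (by omega)
          simp at this; nlinarith
        have hedvd : e ∣ el := ⟨k ^ v, hmul⟩
        rw [if_pos hm, pvInnerB_eq_A, heq]
        have hnd' : ∀ j : Int, 2 ≤ j → j < k + 1 → ¬ (j ∣ e) := by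
          intro j hj2 hjk
          by_cases hjek : j = k
          · rw [hjek]; exact hnde
          · exact fun hje => hnd j hj2 (by omega) (hje.trans hedvd)
        have hIH := ih fA' e (k + 1) (t + (v : Int)) (s + 1) he1 (by omega) hnd'
          (by omega) (by omega)
        simp only [List.length_replicate] at hIH ⊢
        obtain ⟨hA, hB⟩ := hIH
        constructor
        · rw [List.length_append, List.length_replicate]
          push_cast
          rw [hA]; ring
        · simp only [setLen_eq_card] at *
          have hmemF : (k : Int) ∉ pvOuterA e (k + 1) fA' := by
            intro hmem
            have := pvOuterA_mem fA' e (k + 1) k hmem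
            omega
          have hfin : (List.replicate v k ++ pvOuterA e (k + 1) fA').toFinset
              = insert k (pvOuterA e (k + 1) fA').toFinset := by
            ext x
            simp [List.mem_toFinset, List.mem_replicate, Finset.mem_insert]
            constructor
            · rintro (⟨-, h⟩ | h)
              · exact Or.inl h
              · exact Or.inr h
            · rintro (h | h)
              · exact Or.inl ⟨by omega, h⟩
              · exact Or.inr h
          rw [hfin, Finset.card_insert_of_notMem (by simpa [List.mem_toFinset] using hmemF)]
          rw [hB]; push_cast; ring
      · rw [if_neg hm, pvInnerA_ndvd el.toNat el k (by omega) hm]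
        have hnd' : ∀ j : Int, 2 ≤ j → j < k + 1 → ¬ (j ∣ el) := by
          intro j hj2 hjk
          by_cases hjek : j = k
          · rw [hjek]; exact fun hd => hm ((PySem.Int.mod_eq_zero_iff_dvd el k).mpr hd)
          · exact hnd j hj2 (by omega)
        have hIH := ih fA' el (k + 1) t s h1 (by omega) hnd' (by omega) (by omega)
        simpa using hIH
    · rw [if_neg hdd]
      by_cases he1 : el = 1
      · subst he1; simp [pvOuterA_one]
      · have hel2 : 2 ≤ el := by omega
        have hkel : k ≤ el := by
          by_contra h
          exact hnd el hel2 (by omega) dvd_rfl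
        rw [pvOuterA_prime fA el k h2 hkel hnd (by omega) (by omega)]
        simp [PySem.Set.ofList]
        omega

theorem counts_eq (x : Int) (hx : 1 ≤ x) :
    pvCountsB x = (((pvOuterA x 2 (x.toNat + 1)).length : Int),
                   ((PySem.Set.ofList (pvOuterA x 2 (x.toNat + 1))).length : Int)) := by
  have h := pvMain (x.toNat + 1) (x.toNat + 1) x 2 0 0 hx (by omega)
    (by intro j hj2 hjk; omega) (by omega) (by omega)
  simp only at h
  obtain ⟨hA, hB⟩ := h
  simp only [pvCountsB]
  split
  · next hgt => rw [if_pos hgt] at hA hB; ext <;> omega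
  · next hgt => rw [if_neg hgt] at hA hB; ext <;> omega

-- ===== VERDICT (by name: the statement is the Claim_ definition above) =====
theorem fold_eq (arr : List Int) : ∀ st : (Int × Int) × (Int × Int), (∀ x ∈ arr, 1 ≤ x) →
    arr.foldl
      (fun (st : (Int × Int) × (Int × Int)) el =>
        let czynniki := pvOuterA el 2 (el.toNat + 1)
        let st1 := if (czynniki.length : Int) > st.1.2 then (el, (czynniki.length : Int)) else st.1
        let st2 := if ((PySem.Set.ofList czynniki).length : Int) > st.2.2 then
                     (el, ((PySem.Set.ofList czynniki).length : Int)) else st.2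
        (st1, st2)) st
    = arr.foldl
      (fun (st : (Int × Int) × (Int × Int)) x =>
        let c := pvCountsB x
        ((if c.1 > st.1.2 then (x, c.1) else st.1),
         (if c.2 > st.2.2 then (x, c.2) else st.2))) st := by
  induction arr with
  | nil => intro st h; rfl
  | cons x xs ih =>
    intro st h
    simp only [List.foldl_cons]
    rw [counts_eq x (h x (by simp))]
    exact ih _ (fun y hy => h y (by simp [hy]))

theorem zad2_spec : Claim_equal_zad2 := by
  intro arr _ hpre
  unfold Spec_zad2 zad2 zad2_alt
  exact fold_eq arr ((0, 0), (0, 0)) hpre
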